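-- pv_equiv track=rewrite | github.com/janmichael88/Leetcode_Monthly_Challenges | 2024_Challenges/Jun_2024.py | maximumImportance
-- ===== SOURCE A (Python) =====
-- from typing import List
--
-- def maximumImportance(n: int, roads: List[List[int]]) -> int:
--     '''
--     graph is undirected
--     we need maximum total imporance of all roads
--     the cities that appear larger in frequency should be given a higher weight from to 1 to n
--     count indegree?
--     but how to break ties
--     '''
--     indegree = [0]*n
--     for u,v in roads:
--         indegree[u] += 1
--         indegree[v] += 1
--
--     #pair with indices
--     pairs = [(i,v) for i,v in enumerate(indegree)]
--     pairs.sort(key = lambda x : -x[1])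
--     importances = [0]*n
--     for rank,(i,v) in enumerate(pairs):
--         importances[i] = n - rank
--
--     ans = 0
--     for u,v in roads:
--         ans += importances[u] + importances[v]
--
--     return ans
-- ===== SOURCE B (Python) =====
-- from typing import List
--
-- def maximumImportance(n: int, roads: List[List[int]]) -> int:
--     # counting-sort by degree + closed-form block sums: no comparison sort, no per-node assignment
--     degree = [0] * n
--     for u, v in roads:
--         degree[u] += 1
--         degree[v] += 1
--     freq = {}
--     for d in degree:
--         freq[d] = freq.get(d, 0) + 1
--     hi = max(degree) if degree else -1
--     ans = 0
--     w = n
--     for d in range(hi, -1, -1):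
--         c = freq.get(d, 0)
--         ans += d * (c * w - c * (c - 1) // 2)
--         w -= c
--     return ans
-- ===== Notes on version B (the rewrite author's own statement) =====
-- stated objective: alternative
-- what changed: B replaces A's comparison sort of (index,degree) pairs, the rank-to-importance array and the second scan over roads by a counting dict of degree values and a countdown over degree values with closed-form arithmetic-series block sums c*w - c*(c-1)//2 per degree value.
import Mathlib
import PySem

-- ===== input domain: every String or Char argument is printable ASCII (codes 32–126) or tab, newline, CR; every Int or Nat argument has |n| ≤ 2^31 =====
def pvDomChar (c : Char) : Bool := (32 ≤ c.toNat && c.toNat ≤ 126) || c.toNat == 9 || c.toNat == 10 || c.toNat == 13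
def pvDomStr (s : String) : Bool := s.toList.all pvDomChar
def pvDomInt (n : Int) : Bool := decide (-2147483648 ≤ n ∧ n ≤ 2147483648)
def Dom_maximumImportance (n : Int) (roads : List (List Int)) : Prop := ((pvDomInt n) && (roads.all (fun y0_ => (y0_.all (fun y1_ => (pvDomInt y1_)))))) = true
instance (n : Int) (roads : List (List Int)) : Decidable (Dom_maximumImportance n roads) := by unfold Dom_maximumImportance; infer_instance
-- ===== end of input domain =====

-- B replaces A's comparison sort + per-node importance array + second road scan by a counting
-- dict over degree values and closed-form arithmetic-series block sums (objective: alternative).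


-- ===== PORT A =====
-- deg[i] += 1 (Python list indexing, negative wrap included; exact for in-range i — Pre_ excludes IndexError)
def pvBump (xs : List Int) (i : Int) : List Int :=
  PySem.List.pySetD xs i (PySem.List.pyGetD xs i 0 + 1)

-- the first loop, textually identical in A and in B:
-- indegree = [0]*n; for u,v in roads: indegree[u] += 1; indegree[v] += 1
-- (the '_ => deg' arm is where Python raises ValueError on a row not of length 2; Pre_ excludes it)
def pvDegStep (deg : List Int) (r : List Int) : List Int :=
  match r with
  | [u, v] => pvBump (pvBump deg u) v
  | _ => deg

def pvDegrees (n : Int) (roads : List (List Int)) : List Int :=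
  roads.foldl pvDegStep (List.replicate n.toNat 0)

-- ans += importances[u] + importances[v]  (same ValueError arm as above)
def pvAnsStep (imp : List Int) (ans : Int) (r : List Int) : Int :=
  match r with
  | [u, v] => ans + PySem.List.pyGetD imp u 0 + PySem.List.pyGetD imp v 0
  | _ => ans

-- importances[i] = n - rank
def pvImpStep (n : Int) (imp : List Int) (rp : Int × (Int × Int)) : List Int :=
  PySem.List.pySetD imp rp.2.1 (n - rp.1)

-- Python's enumerate(), ported tail-recursively so the port evaluates on long lists;
-- pvEnumerate_eq (below) proves it IS PySem.List.enumerate, the exact enumerate()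
def pvEnumAux {α : Type} : List α → Int → List (Int × α) → List (Int × α)
  | [], _, acc => acc.reverse
  | x :: t, s, acc => pvEnumAux t (s + 1) ((s, x) :: acc)

def pvEnumerate {α : Type} (xs : List α) (s : Int) : List (Int × α) := pvEnumAux xs s []

-- Python's sorted(xs, key=key), ported as the same stable insertion sort with a tail-recursive
-- insert so the port evaluates on long lists; pvSorted_eq (below) proves it IS PySem.List.sorted
def pvInsAux {α : Type} (before : α → α → Bool) (x : α) : List α → List α → List α
  | [], acc => acc.reverse ++ [x]
  | y :: t, acc => if before x y then acc.reverse ++ x :: y :: t else pvInsAux before x t (y :: acc)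

def pvSorted {α κ : Type} [LT κ] [DecidableLT κ] (xs : List α) (key : α → κ) : List α :=
  xs.foldl (fun acc x => pvInsAux (fun a b => decide (key a < key b)) x acc []) []

def maximumImportance (n : Int) (roads : List (List Int)) : Int :=
  let indegree := pvDegrees n roads
  let pairs := pvSorted (pvEnumerate indegree 0) (fun x => -x.2)
  let importances := (pvEnumerate pairs 0).foldl (pvImpStep n) (List.replicate n.toNat 0)
  roads.foldl (pvAnsStep importances) 0

-- ===== PORT B =====
def maximumImportance_alt (n : Int) (roads : List (List Int)) : Int :=
  let degree := pvDegrees n roads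
  -- freq = {}; for d in degree: freq[d] = freq.get(d, 0) + 1
  let freq := degree.foldl (fun d x => d.modify x 0 (· + 1)) (PySem.Dict.empty : PySem.Dict Int Int)
  -- hi = max(degree) if degree else -1
  let hi : Int := match PySem.List.max? degree (fun x => x) with
    | some m => m
    | none => -1
  -- for d in range(hi, -1, -1): c = freq.get(d,0); ans += d*(c*w - c*(c-1)//2); w -= c
  let res := (PySem.List.pyRange hi (-1) (-1)).foldl
    (fun (st : Int × Int) d =>
      let c := freq.getD d 0
      (st.1 + d * (c * st.2 - PySem.Int.floordiv (c * (c - 1)) 2), st.2 - c))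
    (0, n)
  res.1

-- ===== PRECONDITION & SPEC =====
-- Pre_ is exactly where the Python A returns: every road is a two-element list [u, v] whose
-- endpoints are valid Python indices into the length-n degree list (negative wrap included);
-- outside it both A and B raise ValueError / IndexError.
def Pre_maximumImportance (n : Int) (roads : List (List Int)) : Prop :=
  ∀ r ∈ roads, r.length = 2 ∧ ∀ e ∈ r, PySem.Raise.InRange n.toNat e
instance (n : Int) (roads : List (List Int)) : Decidable (Pre_maximumImportance n roads) := by
  unfold Pre_maximumImportance; infer_instance

def pvWitness_maximumImportance : Int × List (List Int) := (3, [[0, 1], [1, 2], [0, 2]])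

def Spec_maximumImportance (n : Int) (roads : List (List Int)) (out : Int) : Prop := out = maximumImportance_alt n roads
instance (n : Int) (roads : List (List Int)) (out : Int) : Decidable (Spec_maximumImportance n roads out) := by unfold Spec_maximumImportance; infer_instance

-- ===== CLAIM (what is proved, stated in full; the proofs are below) =====
def Claim_equal_maximumImportance : Prop := ∀ (n : Int) (roads : List (List Int)), Dom_maximumImportance n roads → Pre_maximumImportance n roads → Spec_maximumImportance n roads (maximumImportance n roads)

-- ===== LEMMAS AND PROOFS =====

lemma pvEnumAux_eq {α : Type} (xs : List α) : ∀ (s : Int) (acc : List (Int × α)),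
    pvEnumAux xs s acc = acc.reverse ++ PySem.List.enumerate xs s := by
  induction xs with
  | nil => intro s acc; simp [pvEnumAux, PySem.List.enumerate]
  | cons x t ih =>
    intro s acc
    rw [pvEnumAux, ih]
    simp [PySem.List.enumerate]

lemma pvEnumerate_eq {α : Type} (xs : List α) (s : Int) :
    pvEnumerate xs s = PySem.List.enumerate xs s := by
  rw [pvEnumerate, pvEnumAux_eq]; simp

lemma pvInsAux_eq {α : Type} (before : α → α → Bool) (x : α) : ∀ (l acc : List α),
    pvInsAux before x l acc = acc.reverse ++ PySem.List.insertBy before x l := by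
  intro l
  induction l with
  | nil => intro acc; simp [pvInsAux, PySem.List.insertBy]
  | cons y t ih =>
    intro acc
    rw [pvInsAux]
    by_cases hb : before x y
    · simp [hb, PySem.List.insertBy]
    · rw [if_neg hb, ih]
      simp [PySem.List.insertBy, hb]

lemma pvSorted_eq {α κ : Type} [LinearOrder κ] (xs : List α) (key : α → κ) :
    pvSorted xs key = PySem.List.sorted xs key false := by
  rw [PySem.List.sorted_eq_foldl_insertBy, pvSorted]
  have h : (fun (acc : List α) x => pvInsAux (fun a b => decide (key a < key b)) x acc [])
      = fun acc x => PySem.List.insertBy (fun a b => decide (key a < key b)) x acc := by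
    funext acc x
    rw [pvInsAux_eq]; simp
  rw [h]

-- port A with the tail-recursive enumerate/sorted replaced by the PySem primitives
lemma pvA_eq (n : Int) (roads : List (List Int)) :
    maximumImportance n roads
      = roads.foldl (pvAnsStep ((PySem.List.enumerate
          (PySem.List.sorted (PySem.List.enumerate (pvDegrees n roads) 0) (fun x => -x.2) false)
          0).foldl (pvImpStep n) (List.replicate n.toNat 0))) 0 := by
  simp only [maximumImportance, pvEnumerate_eq, pvSorted_eq]

-- the dot product Σ deg[i]*imp[i]: the bridge between A's two road scans and the weighted sum
def pvDot : List Int → List Int → Int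
  | a :: as, b :: bs => a * b + pvDot as bs
  | _, _ => 0

-- the Nat index Python's wrap-around indexing lands on
def pvCanon (len : Nat) (i : Int) : Nat := if 0 ≤ i then i.toNat else len - (-i).toNat

lemma pvCanon_lt {len : Nat} {i : Int} (h : PySem.Raise.InRange len i) : pvCanon len i < len := by
  obtain ⟨h1, h2⟩ := h
  unfold pvCanon; split <;> omega

lemma pvIdx_eq {len : Nat} {i : Int} (h : PySem.Raise.InRange len i) :
    PySem.List.pyIdx? len i = some (pvCanon len i) := by
  obtain ⟨h1, h2⟩ := h
  simp only [PySem.List.pyIdx?, pvCanon]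
  split_ifs <;> simp_all

lemma pvGetD_canon {xs : List Int} {i : Int} (d : Int) (h : PySem.Raise.InRange xs.length i) :
    PySem.List.pyGetD xs i d = xs.getD (pvCanon xs.length i) d := by
  have hk := pvCanon_lt h
  simp [PySem.List.pyGetD, PySem.List.pyGet?, pvIdx_eq h, List.getD, List.getElem?_eq_getElem hk]

lemma pvSetD_canon {xs : List Int} {i : Int} (v : Int) (h : PySem.Raise.InRange xs.length i) :
    PySem.List.pySetD xs i v = xs.set (pvCanon xs.length i) v := by
  simp [PySem.List.pySetD, PySem.List.pySet?, pvIdx_eq h]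

lemma pvDot_set_left (deg imp : List Int) (k : Nat) (x : Int)
    (hk : k < deg.length) (hl : deg.length = imp.length) :
    pvDot (deg.set k x) imp = pvDot deg imp + (x - deg.getD k 0) * imp.getD k 0 := by
  induction deg generalizing imp k with
  | nil => simp at hk
  | cons a as ih =>
    cases imp with
    | nil => simp at hl
    | cons b bs =>
      cases k with
      | zero => simp [pvDot]; ring
      | succ k =>
        simp only [List.set_cons_succ, pvDot, List.getD_cons_succ]
        rw [ih bs k (by simpa using hk) (by simpa using hl)]
        ring

lemma pvDot_set_right (deg imp : List Int) (k : Nat) (x : Int)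
    (hk : k < imp.length) (hl : deg.length = imp.length) :
    pvDot deg (imp.set k x) = pvDot deg imp + deg.getD k 0 * (x - imp.getD k 0) := by
  induction deg generalizing imp k with
  | nil => simp at hl; omega
  | cons a as ih =>
    cases imp with
    | nil => simp at hk
    | cons b bs =>
      cases k with
      | zero => simp [pvDot]; ring
      | succ k =>
        simp only [List.set_cons_succ, pvDot, List.getD_cons_succ]
        rw [ih bs k (by simpa using hk) (by simpa using hl)]
        ring

lemma pvDot_zero_right (deg : List Int) (k : Nat) : pvDot deg (List.replicate k 0) = 0 := by
  induction deg generalizing k with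
  | nil => simp [pvDot]
  | cons a as ih =>
    cases k with
    | zero => simp [pvDot]
    | succ k => simp [List.replicate_succ, pvDot, ih]

lemma pvDot_zero_left (imp : List Int) (k : Nat) : pvDot (List.replicate k 0) imp = 0 := by
  induction imp generalizing k with
  | nil => cases k <;> simp [pvDot, List.replicate_succ]
  | cons b bs ih =>
    cases k with
    | zero => simp [pvDot]
    | succ k => simp [List.replicate_succ, pvDot, ih]

lemma pvGetD_replicate_zero (k : Nat) (i : Int) :
    PySem.List.pyGetD (List.replicate k (0 : Int)) i 0 = 0 := by
  cases h : PySem.List.pyGet? (List.replicate k (0 : Int)) i with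
  | none => simp [PySem.List.pyGetD, h]
  | some x =>
    have := PySem.List.mem_of_pyGet?_eq_some _ h
    simp [PySem.List.pyGetD, h, List.eq_of_mem_replicate this]

lemma pvBump_length (xs : List Int) (i : Int) : (pvBump xs i).length = xs.length := by
  simp [pvBump, PySem.List.length_pySetD]

lemma pvDegStep_length (deg : List Int) (r : List Int) : (pvDegStep deg r).length = deg.length := by
  unfold pvDegStep; split <;> simp [pvBump_length]

lemma pvDegFold_length (roads : List (List Int)) (deg : List Int) :
    (roads.foldl pvDegStep deg).length = deg.length := by
  induction roads generalizing deg with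
  | nil => rfl
  | cons r rest ih => simp [List.foldl_cons, ih, pvDegStep_length]

lemma pvImpFold_length (n : Int) (l : List (Int × (Int × Int))) (imp : List Int) :
    (l.foldl (pvImpStep n) imp).length = imp.length := by
  induction l generalizing imp with
  | nil => rfl
  | cons q t ih => simp [List.foldl_cons, ih, pvImpStep, PySem.List.length_pySetD]

lemma pvDot_bump_left (deg imp : List Int) (i : Int)
    (h : PySem.Raise.InRange deg.length i) (hl : deg.length = imp.length) :
    pvDot (pvBump deg i) imp = pvDot deg imp + PySem.List.pyGetD imp i 0 := by
  have hk := pvCanon_lt h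
  have h' : PySem.Raise.InRange imp.length i := by rwa [← hl]
  rw [pvBump, pvSetD_canon _ h, pvGetD_canon _ h,
    pvDot_set_left deg imp _ _ hk hl, pvGetD_canon _ h']
  have : pvCanon imp.length i = pvCanon deg.length i := by rw [hl]
  rw [this]; ring

-- A's final road scan is the dot product of the degree vector with the importance vector
lemma pvAns_eq_dot (imp : List Int) (roads : List (List Int)) (deg0 : List Int) (a : Int)
    (hl : deg0.length = imp.length)
    (hpre : ∀ r ∈ roads, r.length = 2 ∧ ∀ e ∈ r, PySem.Raise.InRange imp.length e) :
    roads.foldl (pvAnsStep imp) a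
      = a + pvDot (roads.foldl pvDegStep deg0) imp - pvDot deg0 imp := by
  induction roads generalizing deg0 a with
  | nil => simp
  | cons r rest ih =>
    obtain ⟨hr2, hre⟩ := hpre r (List.mem_cons_self ..)
    obtain ⟨u, v, rfl⟩ : ∃ u v, r = [u, v] := by
      match r, hr2 with
      | [u, v], _ => exact ⟨u, v, rfl⟩
    have hu : PySem.Raise.InRange imp.length u := hre u (by simp)
    have hv : PySem.Raise.InRange imp.length v := hre v (by simp)
    have hu' : PySem.Raise.InRange deg0.length u := by rwa [hl]
    have hv' : PySem.Raise.InRange (pvBump deg0 u).length v := by rwa [pvBump_length, hl]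
    rw [List.foldl_cons, List.foldl_cons,
      ih (pvDegStep deg0 [u, v]) _ (by simp [pvDegStep, pvBump_length, hl])
        (fun r hr => hpre r (List.mem_cons_of_mem _ hr))]
    show a + PySem.List.pyGetD imp u 0 + PySem.List.pyGetD imp v 0
        + pvDot (List.foldl pvDegStep (pvBump (pvBump deg0 u) v) rest) imp
        - pvDot (pvBump (pvBump deg0 u) v) imp
      = a + pvDot (List.foldl pvDegStep (pvBump (pvBump deg0 u) v) rest) imp - pvDot deg0 imp
    rw [pvDot_bump_left _ _ _ hv' (by rw [pvBump_length, hl]),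
      pvDot_bump_left _ _ _ hu' hl]
    ring

-- A's importance-assignment fold, dotted with deg, is the weighted sum over the rank/pair list
lemma pvDot_impFold (n : Int) (deg : List Int) (l : List (Int × (Int × Int))) (imp0 : List Int)
    (hl : deg.length = imp0.length)
    (h1 : ∀ p ∈ l, 0 ≤ p.2.1 ∧ p.2.1 < (imp0.length : Int))
    (h2 : (l.map (fun p => p.2.1)).Nodup)
    (h3 : ∀ p ∈ l, PySem.List.pyGetD deg p.2.1 0 = p.2.2)
    (h4 : ∀ p ∈ l, PySem.List.pyGetD imp0 p.2.1 0 = 0) :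
    pvDot deg (l.foldl (pvImpStep n) imp0)
      = pvDot deg imp0 + (l.map (fun p => p.2.2 * (n - p.1))).sum := by
  induction l generalizing imp0 with
  | nil => simp
  | cons q t ih =>
    obtain ⟨hq0, hqlt⟩ := h1 q (List.mem_cons_self ..)
    have hqr : PySem.Raise.InRange imp0.length q.2.1 := ⟨by omega, hqlt⟩
    have hcq : pvCanon imp0.length q.2.1 = q.2.1.toNat := by simp [pvCanon, hq0]
    have hklt : q.2.1.toNat < imp0.length := by omega
    have hset : pvImpStep n imp0 q = imp0.set q.2.1.toNat (n - q.1) := by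
      rw [pvImpStep, pvSetD_canon _ hqr, hcq]
    have hlen1 : (pvImpStep n imp0 q).length = imp0.length := by
      simp [pvImpStep, PySem.List.length_pySetD]
    rw [List.foldl_cons, ih (pvImpStep n imp0 q) (by rw [hlen1, hl])
      (fun p hp => by rw [hlen1]; exact h1 p (List.mem_cons_of_mem _ hp))
      (by simpa using h2.of_cons)
      (fun p hp => h3 p (List.mem_cons_of_mem _ hp))
      ?_]
    · rw [hset, pvDot_set_right _ _ _ _ hklt hl]
      have hget0 : imp0.getD q.2.1.toNat 0 = 0 := by
        have := h4 q (List.mem_cons_self ..)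
        rwa [pvGetD_canon _ hqr, hcq] at this
      have hdg : deg.getD q.2.1.toNat 0 = q.2.2 := by
        have := h3 q (List.mem_cons_self ..)
        rwa [pvGetD_canon _ (by rwa [hl]), hl, hcq] at this
      rw [hget0, hdg]
      simp; ring
    · intro p hp
      obtain ⟨hp0, hplt⟩ := h1 p (List.mem_cons_of_mem _ hp)
      have hpr : PySem.Raise.InRange imp0.length p.2.1 := ⟨by omega, hplt⟩
      have hpr1 : PySem.Raise.InRange (pvImpStep n imp0 q).length p.2.1 := by rwa [hlen1]
      have hcp : pvCanon imp0.length p.2.1 = p.2.1.toNat := by simp [pvCanon, hp0]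
      have hne : p.2.1.toNat ≠ q.2.1.toNat := by
        have : p.2.1 ≠ q.2.1 := by
          intro he
          have := h2
          simp only [List.map_cons, List.nodup_cons] at this
          exact (this.1 (List.mem_map.mpr ⟨p, hp, he⟩)).elim
        omega
      rw [pvGetD_canon _ hpr1, hlen1, hcp, hset]
      have h0 := h4 p (List.mem_cons_of_mem _ hp)
      rw [pvGetD_canon _ hpr, hcp] at h0
      have hstep : (imp0.set q.2.1.toNat (n - q.1)).getD p.2.1.toNat 0
          = imp0.getD p.2.1.toNat 0 := by
        simp [List.getD, List.getElem?_set_ne (by omega : q.2.1.toNat ≠ p.2.1.toNat)]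
      rw [hstep, h0]

-- sorted(degree, reverse=True) is the second-component list of A's sorted pairs
lemma pvSortedSnd (deg : List Int) :
    PySem.List.sorted deg (fun x => x) true
      = (PySem.List.sorted (PySem.List.enumerate deg 0) (fun x => -x.2) false).map (·.2) := by
  apply List.Perm.eq_of_pairwise (le := fun a b : Int => b ≤ a)
  · intro a b _ _ h1 h2; omega
  · exact PySem.List.sorted_pairwise_rev deg (fun x => x)
  · rw [List.pairwise_map]
    have := PySem.List.sorted_pairwise (PySem.List.enumerate deg 0) (fun x => -x.2)
    exact this.imp (by intro a b h; omega)
  · have p1 : (PySem.List.sorted deg (fun x => x) true).Perm deg := PySem.List.sorted_perm ..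
    have p2 := (PySem.List.sorted_perm (PySem.List.enumerate deg 0) (fun x => -x.2) false).map (·.2)
    rw [PySem.List.map_snd_enumerate] at p2
    exact p1.trans p2.symm

-- the rank-weighted sum Σ l[i]*(w-i): the common value both programs compute
def pvWsum : List Int → Int → Int
  | [], _ => 0
  | d :: t, w => d * w + pvWsum t (w - 1)

-- A's Σ over enumerate(sorted pairs) of v*(n-rank) is pvWsum of the value list
lemma pvSum_enum (n : Int) (l : List (Int × Int)) (s : Int) :
    ((PySem.List.enumerate l s).map (fun p => p.2.2 * (n - p.1))).sum
      = pvWsum (l.map (·.2)) (n - s) := by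
  induction l generalizing s with
  | nil => simp [PySem.List.enumerate_nil, pvWsum]
  | cons q t ih =>
    simp only [PySem.List.enumerate_cons, List.map_cons, List.sum_cons, pvWsum, ih]
    have : n - (s + 1) = n - s - 1 := by ring
    rw [this]

-- triangle numbers 0+1+…+(c-1), the closed form in B's block sum
def pvTri : Nat → Int
  | 0 => 0
  | c + 1 => pvTri c + c

lemma pvTri_eq (c : Nat) : (c : Int) * ((c : Int) - 1) = 2 * pvTri c := by
  induction c with
  | zero => simp [pvTri]
  | succ c ih =>
    simp only [pvTri]
    push_cast
    push_cast at ih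
    linear_combination ih

lemma pvFloordiv_tri (c : Nat) :
    PySem.Int.floordiv ((c : Int) * ((c : Int) - 1)) 2 = pvTri c := by
  rw [pvTri_eq, PySem.Int.floordiv_eq_iff_of_pos (by norm_num)]
  constructor <;> linarith

lemma pvWsum_zeros (l : List Int) (h : ∀ x ∈ l, x = 0) : ∀ w, pvWsum l w = 0 := by
  induction l with
  | nil => intro w; simp [pvWsum]
  | cons a t ih =>
    intro w
    rw [pvWsum, h a (List.mem_cons_self ..), ih (fun x hx => h x (List.mem_cons_of_mem _ hx))]
    ring

-- a block of c equal values b at the front contributes b*(c*w - Tri c) and uses up c weights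
lemma pvWsum_replicate (c : Nat) (b : Int) (rest : List Int) (w : Int) :
    pvWsum (List.replicate c b ++ rest) w
      = b * (c * w - pvTri c) + pvWsum rest (w - c) := by
  induction c generalizing w with
  | zero => simp [pvTri]
  | succ c ih =>
    simp only [List.replicate_succ, List.cons_append, pvWsum, ih, pvTri]
    have : w - 1 - (c : Int) = w - ((c : Nat) + 1 : Int) := by ring
    push_cast
    push_cast at this
    rw [this]
    ring

-- a descending-sorted list bounded by b is (its b's) ++ (its non-b's)
lemma pvDecomp (b : Int) (l : List Int) (hs : l.Pairwise (· ≥ ·)) (hb : ∀ x ∈ l, x ≤ b) :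
    l = List.replicate (l.count b) b ++ l.filter (fun x => x != b) := by
  induction l with
  | nil => simp
  | cons x t ih =>
    rw [List.pairwise_cons] at hs
    by_cases hx : x = b
    · subst hx
      have hbt : ∀ y ∈ t, y ≤ x := fun y hy => hs.1 y hy
      rw [List.count_cons_self, List.replicate_succ]
      simp only [List.filter_cons, bne_self_eq_false, List.cons_append]
      rw [List.cons_inj_right]
      exact ih hs.2 hbt
    · have hxb : x < b := lt_of_le_of_ne (hb x (List.mem_cons_self ..)) hx
      have hct : t.count b = 0 := by
        rw [List.count_eq_zero]
        intro hmem
        exact absurd (hs.1 b hmem) (by omega)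
      have hcx : (x :: t).count b = 0 := by
        simp [List.count_cons, hct]
        omega
      rw [hcx, List.replicate_zero, List.nil_append]
      have : ∀ y ∈ x :: t, (y != b) = true := by
        intro y hy
        rcases List.mem_cons.mp hy with rfl | hyt
        · simp [hx]
        · have := hs.1 y hyt
          simp only [bne_iff_ne]
          omega
      rw [List.filter_eq_self.mpr this]

-- B's countdown loop over range(m, -1, -1) computes pvWsum of any matching sorted list
lemma pvLoop (m : Nat) : ∀ (ds : List Int), ds.Pairwise (· ≥ ·) →
    (∀ x ∈ ds, 0 ≤ x ∧ x ≤ (m : Int)) → ∀ (a w : Int),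
    ((List.range (m + 1)).map (fun (k : Nat) => (m : Int) - (k : Int))).foldl
      (fun (st : Int × Int) d =>
        (st.1 + d * ((List.count d ds : Int) * st.2
            - PySem.Int.floordiv ((List.count d ds : Int) * ((List.count d ds : Int) - 1)) 2),
         st.2 - (List.count d ds : Int))) (a, w)
      = (a + pvWsum ds w, w - ds.length) := by
  induction m with
  | zero =>
    intro ds hs hbnd a w
    have hz : ∀ x ∈ ds, x = 0 := fun x hx => le_antisymm (by exact_mod_cast (hbnd x hx).2) (hbnd x hx).1
    have hc : List.count (0 : Int) ds = ds.length :=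
      List.count_eq_length.mpr (fun b hb => (hz b hb).symm)
    simp only [Nat.cast_zero]
    rw [pvWsum_zeros ds hz w]
    simp [hc]
  | succ m ih =>
    intro ds hs hbnd a w
    set b : Int := ((m : Int) + 1) with hbdef
    have hcast : ((m + 1 : Nat) : Int) = b := by push_cast; ring
    set cn : Nat := ds.count b with hcn
    set rest : List Int := ds.filter (fun x => x != b) with hrest
    have hdec : ds = List.replicate cn b ++ rest :=
      pvDecomp b ds hs (fun x hx => by have := (hbnd x hx).2; omega)
    -- split the range list: head m+1, tail = range(m,-1,-1)'s list
    have hsplit : (List.range (m + 1 + 1)).map (fun (k : Nat) => ((m + 1 : Nat) : Int) - (k : Int))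
        = b :: (List.range (m + 1)).map (fun (k : Nat) => (m : Int) - (k : Int)) := by
      rw [List.range_succ_eq_map, List.map_cons, List.map_map]
      refine List.cons_eq_cons.mpr ⟨by simp [hbdef], ?_⟩
      apply List.map_congr_left
      intro k _
      simp only [Function.comp_apply, Nat.succ_eq_add_one]
      push_cast
      ring
    rw [hsplit, List.foldl_cons]
    -- the head step in closed form
    have hfd : PySem.Int.floordiv ((cn : Int) * ((cn : Int) - 1)) 2 = pvTri cn :=
      pvFloordiv_tri cn
    -- rewrite the remaining fold from ds-counts to rest-counts
    have hcongr : ∀ (st : Int × Int), ∀ d ∈ (List.range (m + 1)).map (fun (k : Nat) => (m : Int) - (k : Int)),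
        ((st.1 + d * ((List.count d ds : Int) * st.2
            - PySem.Int.floordiv ((List.count d ds : Int) * ((List.count d ds : Int) - 1)) 2),
          st.2 - (List.count d ds : Int)) : Int × Int)
        = (st.1 + d * ((List.count d rest : Int) * st.2
            - PySem.Int.floordiv ((List.count d rest : Int) * ((List.count d rest : Int) - 1)) 2),
          st.2 - (List.count d rest : Int)) := by
      intro st d hd
      obtain ⟨k, hk, rfl⟩ := List.mem_map.mp hd
      rw [List.mem_range] at hk
      have hne : ((m : Int) - (k : Int)) ≠ b := by rw [hbdef]; omega
      have : List.count ((m : Int) - (k : Int)) rest = List.count ((m : Int) - (k : Int)) ds := by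
        rw [hrest]
        exact List.count_filter (by simpa [bne_iff_ne] using hne)
      rw [this]
    rw [PySem.List.foldl_congr_mem _ _ _ _ hcongr]
    have hrs : rest.Pairwise (· ≥ ·) := hs.filter _
    have hrb : ∀ x ∈ rest, 0 ≤ x ∧ x ≤ (m : Int) := by
      intro x hx
      have hmem : x ∈ ds := List.mem_of_mem_filter hx
      have hne : x ≠ b := by
        have := List.of_mem_filter hx
        simpa [bne_iff_ne] using this
      have h2 := (hbnd x hmem).2
      exact ⟨(hbnd x hmem).1, by omega⟩
    rw [ih rest hrs hrb]
    have hlen : (ds.length : Int) = (cn : Int) + (rest.length : Int) := by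
      rw [hdec]
      push_cast [List.length_append, List.length_replicate]
      ring
    have hws : pvWsum ds w = b * ((cn : Int) * w - pvTri cn) + pvWsum rest (w - (cn : Int)) := by
      rw [hdec, pvWsum_replicate]
    simp only [Prod.mk.injEq, ← hcn, hfd]
    constructor
    · rw [hws]; ring
    · rw [hlen]; ring

-- degrees built from 0 by increments are nonnegative (indices in range by Pre_)
lemma pvDeg_nonneg (roads : List (List Int)) (deg0 : List Int)
    (h0 : ∀ x ∈ deg0, 0 ≤ x)
    (hpre : ∀ r ∈ roads, r.length = 2 ∧ ∀ e ∈ r, PySem.Raise.InRange deg0.length e) :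
    ∀ x ∈ roads.foldl pvDegStep deg0, 0 ≤ x := by
  induction roads generalizing deg0 with
  | nil => exact fun x hx => h0 x hx
  | cons r rest ih =>
    obtain ⟨hr2, hre⟩ := hpre r (List.mem_cons_self ..)
    obtain ⟨u, v, rfl⟩ : ∃ u v, r = [u, v] := by
      match r, hr2 with
      | [u, v], _ => exact ⟨u, v, rfl⟩
    have hbump : ∀ (xs : List Int) (i : Int), PySem.Raise.InRange xs.length i →
        (∀ x ∈ xs, 0 ≤ x) → ∀ x ∈ pvBump xs i, 0 ≤ x := by
      intro xs i hir hxs x hx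
      rw [pvBump, pvSetD_canon _ hir] at hx
      rcases List.mem_or_eq_of_mem_set hx with hmem | rfl
      · exact hxs x hmem
      · have := pvGetD_canon (xs := xs) (i := i) 0 hir
        have hmemget : PySem.List.pyGetD xs i 0 ∈ xs ∨ PySem.List.pyGetD xs i 0 = 0 := by
          rw [this, List.getD]
          cases hg : xs[pvCanon xs.length i]? with
          | none => right; simp
          | some y => left; simp only [Option.getD_some]; exact List.mem_of_getElem? hg
        rcases hmemget with hm | hz
        · have := hxs _ hm; omega
        · omega
    have hu : PySem.Raise.InRange deg0.length u := hre u (by simp)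
    have hv : PySem.Raise.InRange (pvBump deg0 u).length v := by
      rw [pvBump_length]; exact hre v (by simp)
    rw [List.foldl_cons]
    refine ih (pvDegStep deg0 [u, v]) ?_ ?_
    · show ∀ x ∈ pvBump (pvBump deg0 u) v, 0 ≤ x
      exact hbump _ _ hv (hbump _ _ hu h0)
    · intro r hr
      have := hpre r (List.mem_cons_of_mem _ hr)
      rwa [show (pvDegStep deg0 [u, v]).length = deg0.length from pvDegStep_length deg0 [u, v]]

lemma pvMain (n : Int) (roads : List (List Int)) (hpre : Pre_maximumImportance n roads) :
    maximumImportance n roads = maximumImportance_alt n roads := by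
  have hdlen : (pvDegrees n roads).length = n.toNat := by
    rw [pvDegrees, pvDegFold_length, List.length_replicate]
  set deg := pvDegrees n roads with hdeg
  set sp := PySem.List.sorted (PySem.List.enumerate deg 0) (fun x => -x.2) false with hsp
  set imp := (PySem.List.enumerate sp 0).foldl (pvImpStep n) (List.replicate n.toNat 0) with himp
  have himplen : imp.length = n.toNat := by
    rw [himp, pvImpFold_length, List.length_replicate]
  have hmem : ∀ p ∈ PySem.List.enumerate sp 0,
      ∃ (j : Nat) (_ : j < deg.length), p.2 = (↑j, deg[j]) := by
    intro p hp
    rw [PySem.List.mem_enumerate_iff] at hp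
    obtain ⟨k, hk, rfl⟩ := hp
    have h2 : sp[k] ∈ sp := List.getElem_mem hk
    have h3 : sp[k] ∈ PySem.List.enumerate deg 0 := (PySem.List.sorted_perm ..).mem_iff.mp h2
    rw [PySem.List.mem_enumerate_iff] at h3
    obtain ⟨j, hj, hje⟩ := h3
    exact ⟨j, hj, by simp [hje]⟩
  have hA : maximumImportance n roads = pvDot deg imp := by
    rw [pvA_eq, ← hdeg, ← hsp, ← himp]
    rw [pvAns_eq_dot imp roads (List.replicate n.toNat 0) 0
      (by simp [himplen])
      (fun r hr => by rw [himplen]; exact hpre r hr)]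
    rw [show roads.foldl pvDegStep (List.replicate n.toNat 0) = deg from rfl]
    rw [pvDot_zero_left]
    ring
  have hdot : pvDot deg imp
      = ((PySem.List.enumerate sp 0).map (fun p => p.2.2 * (n - p.1))).sum := by
    rw [himp, pvDot_impFold n deg _ _ (by simp [hdlen])]
    · rw [pvDot_zero_right]; ring
    · intro p hp
      obtain ⟨j, hj, hpe⟩ := hmem p hp
      constructor
      · rw [hpe]; positivity
      · rw [hpe]; simp; omega
    · have hmap : (PySem.List.enumerate sp 0).map (fun p => p.2.1)
          = sp.map (·.1) := by
        rw [show (fun p : Int × (Int × Int) => p.2.1) = ((·.1) ∘ (·.2)) from rfl,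
          ← List.map_map, PySem.List.map_snd_enumerate]
      rw [hmap]
      have hperm : (sp.map (·.1)).Perm ((PySem.List.enumerate deg 0).map (·.1)) :=
        (PySem.List.sorted_perm ..).map _
      rw [hperm.nodup_iff]
      exact ((List.pairwise_map.mpr (PySem.List.pairwise_lt_enumerate deg 0)).imp ne_of_lt)
    · intro p hp
      obtain ⟨j, hj, hpe⟩ := hmem p hp
      rw [hpe]
      simp [PySem.List.pyGetD_natCast, List.getD, List.getElem?_eq_getElem hj]
    · intro p hp
      exact pvGetD_replicate_zero ..
  -- A equals the rank-weighted sum of the descending-sorted degree list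
  set ds := PySem.List.sorted deg (fun x => x) true with hds
  have hAw : maximumImportance n roads = pvWsum ds n := by
    rw [hA, hdot, pvSum_enum, sub_zero, hds, pvSortedSnd, hsp]
  have hperm : ds.Perm deg := PySem.List.sorted_perm ..
  have hnonneg : ∀ x ∈ deg, 0 ≤ x :=
    pvDeg_nonneg roads (List.replicate n.toNat 0) (by simp)
      (fun r hr => by rw [List.length_replicate]; exact hpre r hr)
  have hdsort : ds.Pairwise (· ≥ ·) := PySem.List.sorted_pairwise_rev deg (fun x => x)
  -- B side
  have hfreq : deg.foldl (fun d x => d.modify x 0 (· + 1)) (PySem.Dict.empty : PySem.Dict Int Int)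
      = PySem.Dict.counter deg := (PySem.Dict.counter_eq_foldl deg).symm
  rw [hAw]
  simp only [maximumImportance_alt]
  rw [← hdeg, hfreq]
  cases hdnil : PySem.List.max? deg (fun x => x) with
  | none =>
    have hnil : deg = [] := (PySem.List.max?_eq_none_iff ..).mp hdnil
    have hdsnil : ds = [] := List.Perm.eq_nil (by rw [hnil] at hperm; exact hperm)
    have hr0 : PySem.List.pyRange (-1) (-1) (-1) = [] := by
      rw [PySem.List.pyRange_neg_one]
      norm_num
    rw [hr0, hdsnil]
    simp [pvWsum]
  | some mx =>
    have hmx0 : 0 ≤ mx := hnonneg mx (PySem.List.max?_mem hdnil)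
    set m : Nat := mx.toNat with hmdef
    have hm : ((m : Nat) : Int) = mx := Int.toNat_of_nonneg hmx0
    have hrn : PySem.List.pyRange mx (-1) (-1)
        = (List.range (m + 1)).map (fun (k : Nat) => ((m : Nat) : Int) - (k : Int)) := by
      rw [PySem.List.pyRange_neg_one]
      have h1 : (mx - (-1)).toNat = m + 1 := by omega
      rw [h1, hm]
    rw [hrn]
    have hcongr : ∀ (st : Int × Int), ∀ d ∈ (List.range (m + 1)).map (fun (k : Nat) => ((m : Nat) : Int) - (k : Int)),
        ((st.1 + d * ((PySem.Dict.counter deg).getD d 0 * st.2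
            - PySem.Int.floordiv ((PySem.Dict.counter deg).getD d 0
                * ((PySem.Dict.counter deg).getD d 0 - 1)) 2),
          st.2 - (PySem.Dict.counter deg).getD d 0) : Int × Int)
        = (st.1 + d * ((List.count d ds : Int) * st.2
            - PySem.Int.floordiv ((List.count d ds : Int) * ((List.count d ds : Int) - 1)) 2),
          st.2 - (List.count d ds : Int)) := by
      intro st d _
      rw [PySem.Dict.getD_counter, hperm.count_eq]
    rw [PySem.List.foldl_congr_mem _ _ _ _ hcongr]
    have hbnd : ∀ x ∈ ds, 0 ≤ x ∧ x ≤ ((m : Nat) : Int) := by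
      intro x hx
      have hxd : x ∈ deg := hperm.mem_iff.mp hx
      refine ⟨hnonneg x hxd, ?_⟩
      rw [hm]
      exact PySem.List.max?_isMax hdnil x hxd
    rw [pvLoop m ds hdsort hbnd 0 n]
    simp

-- ===== VERDICT (by name: the statement is the Claim_ definition above) =====
theorem maximumImportance_spec : Claim_equal_maximumImportance := by
  intro n roads _ hpre
  unfold Spec_maximumImportance
  exact pvMain n roads hpre
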